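-- pv_equiv track=rewrite | github.com/giordanosilveira/Apredizado-em-python | 8/exercicios/ex48s_S8.py | soma_acima_diag_principal
-- ===== SOURCE A (Python) =====
-- def soma_acima_diag_principal(matriz):
--     """Soma os números acima da diagonal principal.
--
--     Args:
--         matriz (matriz de inteiros): Uma matriz de números inteiros
--
--     Returns:
--         Soma: A soma dos elementos da diagonal principal
--     """
--     soma = 0
--     for i in range(3):
--         j = i  + 1 # Os elementos da diagonal são quando i=j. j = 1 + 1 para não somar a diagonal principal
--         while j < 3:
--             soma = soma + matriz[i][j]
--             j = j + 1
--     return soma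
-- ===== SOURCE B (Python) =====
-- def soma_acima_diag_principal(matriz):
--     return matriz[0][1] + matriz[0][2] + matriz[1][2]
-- ===== Notes on version B (the rewrite author's own statement) =====
-- stated objective: simpler
-- what changed: Replaces the nested for/while accumulation with a single closed-form return of the three above-diagonal cells matriz[0][1] + matriz[0][2] + matriz[1][2].
import Mathlib
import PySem

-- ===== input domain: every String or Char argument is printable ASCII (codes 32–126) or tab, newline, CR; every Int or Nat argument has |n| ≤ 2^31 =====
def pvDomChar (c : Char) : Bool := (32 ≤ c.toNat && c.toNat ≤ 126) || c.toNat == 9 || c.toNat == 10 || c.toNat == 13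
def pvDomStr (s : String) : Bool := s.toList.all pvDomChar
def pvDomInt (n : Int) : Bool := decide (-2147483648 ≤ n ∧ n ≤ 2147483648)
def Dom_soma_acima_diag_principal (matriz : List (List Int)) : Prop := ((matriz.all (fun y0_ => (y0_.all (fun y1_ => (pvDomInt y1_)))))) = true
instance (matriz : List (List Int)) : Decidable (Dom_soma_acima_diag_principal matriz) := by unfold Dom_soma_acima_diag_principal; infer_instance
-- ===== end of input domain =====

-- B replaces A's nested for/while accumulation with one closed-form sum of the three
-- above-diagonal cells (simpler; same addition order, same value on Pre_).

-- ===== PORT A =====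
-- matriz[i][j] as Python computes it; none = IndexError (excluded by Pre_), getD 0 is
-- never reached on Pre_ inputs.
def pvCellA (matriz : List (List Int)) (i j : Int) : Int :=
  ((PySem.List.pyGet? matriz i).bind (fun row => PySem.List.pyGet? row j)).getD 0

-- the inner 'while j < 3' loop, transliterated with fuel (at most 3 iterations)
def pvWhileA (matriz : List (List Int)) (i : Int) : Int → Int → Nat → Int
  | _, soma, 0 => soma
  | j, soma, Nat.succ fuel =>
    if j < 3 then pvWhileA matriz i (j + 1) (soma + pvCellA matriz i j) fuel
    else soma

def soma_acima_diag_principal (matriz : List (List Int)) : Int :=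
  (PySem.List.pyRange 0 3 1).foldl (fun soma i => pvWhileA matriz i (i + 1) soma 3) 0

-- ===== PORT B =====
def soma_acima_diag_principal_alt (matriz : List (List Int)) : Int :=
  pvCellA matriz 0 1 + pvCellA matriz 0 2 + pvCellA matriz 1 2

-- ===== PRECONDITION & SPEC =====
-- Pre_ excludes exactly the inputs on which Python A raises IndexError: fewer than 2 rows,
-- or row 0 or row 1 shorter than 3.
def Pre_soma_acima_diag_principal (matriz : List (List Int)) : Prop :=
  2 ≤ matriz.length ∧ 3 ≤ (matriz.getD 0 []).length ∧ 3 ≤ (matriz.getD 1 []).length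
instance (matriz : List (List Int)) : Decidable (Pre_soma_acima_diag_principal matriz) := by
  unfold Pre_soma_acima_diag_principal; infer_instance

def pvWitness_soma_acima_diag_principal : List (List Int) :=
  [[1, 2, 3], [4, 5, 6], [7, 8, 9]]

def Spec_soma_acima_diag_principal (matriz : List (List Int)) (out : Int) : Prop := out = soma_acima_diag_principal_alt matriz
instance (matriz : List (List Int)) (out : Int) : Decidable (Spec_soma_acima_diag_principal matriz out) := by unfold Spec_soma_acima_diag_principal; infer_instance

-- ===== CLAIM (what is proved, stated in full; the proofs are below) =====
def Claim_equal_soma_acima_diag_principal : Prop := ∀ (matriz : List (List Int)), Dom_soma_acima_diag_principal matriz → Pre_soma_acima_diag_principal matriz → Spec_soma_acima_diag_principal matriz (soma_acima_diag_principal matriz)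

-- ===== LEMMAS AND PROOFS =====

-- ===== VERDICT (by name: the statement is the Claim_ definition above) =====
theorem soma_acima_diag_principal_spec : Claim_equal_soma_acima_diag_principal := by
  intro matriz _ hpre
  obtain ⟨h1, h2, h3⟩ := hpre
  match matriz with
  | [] => simp at h1
  | [_] => simp at h1
  | r0 :: r1 :: rest =>
    simp only [List.getD_cons_zero, List.getD_cons_succ] at h2 h3
    match r0, r1 with
    | a :: b :: c :: _, d :: e :: f :: _ =>
      show _ = _
      simp [soma_acima_diag_principal, soma_acima_diag_principal_alt,
            pvWhileA, pvCellA,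
            PySem.List.pyRange, PySem.List.pyGet?, PySem.List.pyIdx?,
            List.range_succ]
    | [], _ => simp at h2
    | [_], _ => simp at h2
    | [_,_], _ => simp at h2
    | _ :: _ :: _ :: _, [] => simp at h3
    | _ :: _ :: _ :: _, [_] => simp at h3
    | _ :: _ :: _ :: _, [_,_] => simp at h3
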